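-- pv_equiv track=rewrite | github.com/RaysonSu/adventofcode2016 | Day 2/main.py | main_part_2
-- ===== SOURCE A (Python) =====
-- OUTPUT_TYPE = str
--
-- def main_part_2(inp: list[str]) -> OUTPUT_TYPE:
--     grid: list[str] = [
--         "       ",
--         "   1   ",
--         "  234  ",
--         " 56789 ",
--         "  ABC  ",
--         "   D   ",
--         "       "
--     ]
--
--     ret: str = ""
--     position: list[int] = [1, 3]
--     for row in inp:
--         for direc in row.strip():
--             pos_backup = position.copy()
--             if direc == "U":
--                 position[1] -= 1
--             elif direc == "D":
--                 position[1] += 1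
--             elif direc == "L":
--                 position[0] -= 1
--             elif direc == "R":
--                 position[0] += 1
--
--             if grid[position[1]][position[0]] == " ":
--                 position = pos_backup
--
--         ret += grid[position[1]][position[0]]
--
--     return ret
-- ===== SOURCE B (Python) =====
-- _TABLE = {
--     ('1', 'D'): '3',
--     ('2', 'R'): '3', ('2', 'D'): '6',
--     ('3', 'U'): '1', ('3', 'L'): '2', ('3', 'R'): '4', ('3', 'D'): '7',
--     ('4', 'L'): '3', ('4', 'D'): '8',
--     ('5', 'R'): '6',
--     ('6', 'U'): '2', ('6', 'L'): '5', ('6', 'R'): '7', ('6', 'D'): 'A',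
--     ('7', 'U'): '3', ('7', 'L'): '6', ('7', 'R'): '8', ('7', 'D'): 'B',
--     ('8', 'U'): '4', ('8', 'L'): '7', ('8', 'R'): '9', ('8', 'D'): 'C',
--     ('9', 'L'): '8',
--     ('A', 'U'): '6', ('A', 'R'): 'B',
--     ('B', 'U'): '7', ('B', 'L'): 'A', ('B', 'R'): 'C', ('B', 'D'): 'D',
--     ('C', 'U'): '8', ('C', 'L'): 'B',
--     ('D', 'U'): 'B',
-- }
--
--
-- def main_part_2(inp: list[str]) -> str:
--     keys = []
--     cur = '5'
--     for row in inp: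
--         for direc in row:
--             cur = _TABLE.get((cur, direc), cur)
--         keys.append(cur)
--     return "".join(keys)
-- ===== Notes on version B (the rewrite author's own statement) =====
-- stated objective: idiomatic
-- what changed: Replaced the 2-D grid walk with coordinate arithmetic, list backup/copy and a blank-cell bounds check by a precomputed flat dict mapping (button, direction) to the neighbouring button, so the state is a single character and illegal moves are simply absent keys.
import Mathlib
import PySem

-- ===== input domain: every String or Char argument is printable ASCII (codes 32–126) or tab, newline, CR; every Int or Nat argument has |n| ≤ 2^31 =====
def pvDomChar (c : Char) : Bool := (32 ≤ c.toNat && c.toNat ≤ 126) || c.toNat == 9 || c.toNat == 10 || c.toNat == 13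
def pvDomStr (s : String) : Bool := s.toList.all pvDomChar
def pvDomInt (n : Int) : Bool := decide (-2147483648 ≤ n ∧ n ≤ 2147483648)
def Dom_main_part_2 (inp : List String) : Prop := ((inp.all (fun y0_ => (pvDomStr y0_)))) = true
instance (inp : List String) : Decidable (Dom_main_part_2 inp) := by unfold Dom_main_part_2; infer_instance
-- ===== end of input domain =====

-- B changes A's 2-D grid simulation into a flat (button, direction) → button transition table (idiomatic, same cost).

-- ===== PORT A =====
def pvGrid : List String :=
  ["       ", "   1   ", "  234  ", " 56789 ", "  ABC  ", "   D   ", "       "]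

-- grid[y][x]; the positions A reaches are always in range (the grid border is all spaces),
-- so the `getD` defaults are never used.
def pvGridAt (x y : Int) : Char :=
  (PySem.Str.pyGet? ((PySem.List.pyGet? pvGrid y).getD "") x).getD ' '

-- one step of A's inner loop: move, then restore the backup if the target cell is a space
def pvStepA (pos : Int × Int) (direc : Char) : Int × Int :=
  let p : Int × Int :=
    if direc = 'U' then (pos.1, pos.2 - 1)
    else if direc = 'D' then (pos.1, pos.2 + 1)
    else if direc = 'L' then (pos.1 - 1, pos.2)
    else if direc = 'R' then (pos.1 + 1, pos.2)
    else pos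
  if pvGridAt p.1 p.2 = ' ' then pos else p

def main_part_2 (inp : List String) : String :=
  let fin := inp.foldl
    (fun (st : String × (Int × Int)) row =>
      let pos := (PySem.Str.strip row).toList.foldl pvStepA st.2
      (st.1 ++ String.singleton (pvGridAt pos.1 pos.2), pos))
    ("", (1, 3))
  fin.1

-- ===== PORT B =====
def pvTable : PySem.Dict (Char × Char) Char := PySem.Dict.ofList
  [ (('1', 'D'), '3'),
    (('2', 'R'), '3'), (('2', 'D'), '6'),
    (('3', 'U'), '1'), (('3', 'L'), '2'), (('3', 'R'), '4'), (('3', 'D'), '7'),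
    (('4', 'L'), '3'), (('4', 'D'), '8'),
    (('5', 'R'), '6'),
    (('6', 'U'), '2'), (('6', 'L'), '5'), (('6', 'R'), '7'), (('6', 'D'), 'A'),
    (('7', 'U'), '3'), (('7', 'L'), '6'), (('7', 'R'), '8'), (('7', 'D'), 'B'),
    (('8', 'U'), '4'), (('8', 'L'), '7'), (('8', 'R'), '9'), (('8', 'D'), 'C'),
    (('9', 'L'), '8'),
    (('A', 'U'), '6'), (('A', 'R'), 'B'),
    (('B', 'U'), '7'), (('B', 'L'), 'A'), (('B', 'R'), 'C'), (('B', 'D'), 'D'),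
    (('C', 'U'), '8'), (('C', 'L'), 'B'),
    (('D', 'U'), 'B') ]

def pvStepB (cur : Char) (direc : Char) : Char :=
  PySem.Dict.getD pvTable (cur, direc) cur

def main_part_2_alt (inp : List String) : String :=
  let fin := inp.foldl
    (fun (st : List Char × Char) row =>
      let cur := row.toList.foldl pvStepB st.2
      (st.1 ++ [cur], cur))
    ([], '5')
  PySem.Str.join "" (fin.1.map String.singleton)

-- ===== PRECONDITION & SPEC =====
def Spec_main_part_2 (inp : List String) (out : String) : Prop := out = main_part_2_alt inp
instance (inp : List String) (out : String) : Decidable (Spec_main_part_2 inp out) := by unfold Spec_main_part_2; infer_instance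

-- ===== CLAIM (what is proved, stated in full; the proofs are below) =====
def Claim_equal_main_part_2 : Prop := ∀ (inp : List String), Dom_main_part_2 inp → Spec_main_part_2 inp (main_part_2 inp)

-- ===== LEMMAS AND PROOFS =====

-- the 13 buttons: A's coordinate paired with B's character
def pvPairs : List ((Int × Int) × Char) :=
  [ ((3, 1), '1'),
    ((2, 2), '2'), ((3, 2), '3'), ((4, 2), '4'),
    ((1, 3), '5'), ((2, 3), '6'), ((3, 3), '7'), ((4, 3), '8'), ((5, 3), '9'),
    ((2, 4), 'A'), ((3, 4), 'B'), ((4, 4), 'C'),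
    ((3, 5), 'D') ]

theorem pvStepA_nonmove (pos : Int × Int) (c : Char)
    (hU : c ≠ 'U') (hD : c ≠ 'D') (hL : c ≠ 'L') (hR : c ≠ 'R') :
    pvStepA pos c = pos := by
  simp [pvStepA, hU, hD, hL, hR]

theorem pvTable_eq : pvTable = PySem.Dict.mk
    [ (('1', 'D'), '3'),
      (('2', 'R'), '3'), (('2', 'D'), '6'),
      (('3', 'U'), '1'), (('3', 'L'), '2'), (('3', 'R'), '4'), (('3', 'D'), '7'),
      (('4', 'L'), '3'), (('4', 'D'), '8'),
      (('5', 'R'), '6'),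
      (('6', 'U'), '2'), (('6', 'L'), '5'), (('6', 'R'), '7'), (('6', 'D'), 'A'),
      (('7', 'U'), '3'), (('7', 'L'), '6'), (('7', 'R'), '8'), (('7', 'D'), 'B'),
      (('8', 'U'), '4'), (('8', 'L'), '7'), (('8', 'R'), '9'), (('8', 'D'), 'C'),
      (('9', 'L'), '8'),
      (('A', 'U'), '6'), (('A', 'R'), 'B'),
      (('B', 'U'), '7'), (('B', 'L'), 'A'), (('B', 'R'), 'C'), (('B', 'D'), 'D'),
      (('C', 'U'), '8'), (('C', 'L'), 'B'),
      (('D', 'U'), 'B') ] := by decide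

theorem pvStepB_nonmove (cur : Char) (c : Char)
    (hU : c ≠ 'U') (hD : c ≠ 'D') (hL : c ≠ 'L') (hR : c ≠ 'R') :
    pvStepB cur c = cur := by
  have hU' : 'U' ≠ c := fun e => hU e.symm
  have hD' : 'D' ≠ c := fun e => hD e.symm
  have hL' : 'L' ≠ c := fun e => hL e.symm
  have hR' : 'R' ≠ c := fun e => hR e.symm
  simp [pvStepB, pvTable_eq, PySem.Dict.getD, PySem.Dict.get?, Prod.mk.injEq, hU', hD', hL', hR']

-- one step preserves the pairing
theorem pvStep_linked (pos : Int × Int) (ch : Char) (h : (pos, ch) ∈ pvPairs) (c : Char) :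
    (pvStepA pos c, pvStepB ch c) ∈ pvPairs := by
  by_cases hU : c = 'U'
  · subst hU; fin_cases h <;> decide
  · by_cases hD : c = 'D'
    · subst hD; fin_cases h <;> decide
    · by_cases hL : c = 'L'
      · subst hL; fin_cases h <;> decide
      · by_cases hR : c = 'R'
        · subst hR; fin_cases h <;> decide
        · rw [pvStepA_nonmove pos c hU hD hL hR, pvStepB_nonmove ch c hU hD hL hR]
          exact h

theorem pvGridAt_linked (pos : Int × Int) (ch : Char) (h : (pos, ch) ∈ pvPairs) :
    pvGridAt pos.1 pos.2 = ch := by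
  fin_cases h <;> decide

theorem pvFold_linked (cs : List Char) (pos : Int × Int) (ch : Char)
    (h : (pos, ch) ∈ pvPairs) :
    (cs.foldl pvStepA pos, cs.foldl pvStepB ch) ∈ pvPairs := by
  induction cs generalizing pos ch with
  | nil => exact h
  | cons c cs ih => exact ih _ _ (pvStep_linked pos ch h c)

-- whitespace chars are no-ops for A's step
theorem pvStepA_space (pos : Int × Int) (c : Char) (h : PySem.Chars.isspace c = true) :
    pvStepA pos c = pos := by
  apply pvStepA_nonmove <;> (rintro rfl; exact absurd h (by decide))

theorem pvFoldA_dropWhile (cs : List Char) (pos : Int × Int) :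
    (cs.dropWhile PySem.Chars.isspace).foldl pvStepA pos = cs.foldl pvStepA pos := by
  induction cs generalizing pos with
  | nil => rfl
  | cons c cs ih =>
    by_cases h : PySem.Chars.isspace c = true
    · simp [List.dropWhile, h, ih, List.foldl_cons, pvStepA_space pos c h]
    · simp [List.dropWhile, h]

theorem pvFoldA_rstrip (cs : List Char) (pos : Int × Int) :
    (PySem.Chars.rstrip cs).foldl pvStepA pos = cs.foldl pvStepA pos := by
  induction cs using List.reverseRecOn generalizing pos with
  | nil => rfl
  | append_singleton cs c ih =>
    by_cases h : PySem.Chars.isspace c = true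
    · have : PySem.Chars.rstrip (cs ++ [c]) = PySem.Chars.rstrip cs := by
        simp [PySem.Chars.rstrip, h]
      rw [this, ih, List.foldl_append, List.foldl_cons, List.foldl_nil,
        pvStepA_space _ c h]
    · have : PySem.Chars.rstrip (cs ++ [c]) = cs ++ [c] := by
        simp [PySem.Chars.rstrip, h]
      rw [this]

theorem pvFoldA_strip (s : String) (pos : Int × Int) :
    (PySem.Str.strip s).toList.foldl pvStepA pos = s.toList.foldl pvStepA pos := by
  rw [PySem.Str.toList_strip]
  show (PySem.Chars.rstrip (PySem.Chars.lstrip s.toList)).foldl pvStepA pos = _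
  rw [pvFoldA_rstrip]
  exact pvFoldA_dropWhile s.toList pos

theorem pvIntercalate_nil (l : List (List Char)) : List.intercalate [] l = l.flatten := by
  unfold List.intercalate
  induction l with
  | nil => rfl
  | cons a t ih =>
    cases t with
    | nil => rfl
    | cons b t2 => simp [List.intersperse_cons₂] at ih ⊢; simp [ih]

theorem pvJoin_eq (ks : List Char) :
    PySem.Str.join "" (ks.map String.singleton) = String.ofList ks := by
  apply String.toList_inj.mp
  simp only [PySem.Str.join, PySem.Chars.join, String.toList_ofList, String.toList_empty,
    pvIntercalate_nil, List.map_map, Function.comp_def, String.toList_singleton]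
  induction ks with
  | nil => rfl
  | cons a t ih => simp [ih]

theorem pvJoin_snoc (ks : List Char) (c : Char) :
    PySem.Str.join "" (ks.map String.singleton) ++ String.singleton c
      = PySem.Str.join "" ((ks ++ [c]).map String.singleton) := by
  rw [pvJoin_eq, pvJoin_eq]
  apply String.toList_inj.mp
  simp

-- the main loop invariant
theorem pvMain_loop (inp : List String) (acc : String) (ks : List Char)
    (pos : Int × Int) (ch : Char)
    (hacc : acc = PySem.Str.join "" (ks.map String.singleton))
    (h : (pos, ch) ∈ pvPairs) :
    (inp.foldl
      (fun (st : String × (Int × Int)) row =>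
        let p := (PySem.Str.strip row).toList.foldl pvStepA st.2
        (st.1 ++ String.singleton (pvGridAt p.1 p.2), p)) (acc, pos)).1 =
    PySem.Str.join ""
      (((inp.foldl
        (fun (st : List Char × Char) row =>
          let c := row.toList.foldl pvStepB st.2
          (st.1 ++ [c], c)) (ks, ch)).1).map String.singleton) := by
  induction inp generalizing acc ks pos ch with
  | nil => simpa using hacc
  | cons row rest ih =>
    simp only [List.foldl_cons]
    have hstrip := pvFoldA_strip row pos
    have hlink := pvFold_linked row.toList pos ch h
    apply ih
    · rw [hstrip, pvGridAt_linked _ _ hlink, hacc, pvJoin_snoc]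
    · rw [hstrip]; exact hlink

-- ===== VERDICT (by name: the statement is the Claim_ definition above) =====
theorem main_part_2_spec : Claim_equal_main_part_2 := by
  intro inp _
  unfold Spec_main_part_2 main_part_2 main_part_2_alt
  exact pvMain_loop inp "" [] (1, 3) '5' (by decide) (by decide)
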